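-- pv_equiv track=rewrite | github.com/magi-9/e-plant | data/convert_to_csv.py | build_option_map
-- ===== SOURCE A (Python) =====
-- def build_option_map(parsed_rows):
--     """Map compatibility family number to aggregated option token string."""
--     by_family = {}
--     for row in parsed_rows:
--         family = row.get("reference_family")
--         if not family:
--             continue
--         by_family.setdefault(family, [])
--         token = row.get("options", "")
--         if token and token not in by_family[family]:
--             by_family[family].append(token)
--     return {family: ";".join(tokens[:12]) for family, tokens in by_family.items()}
-- ===== SOURCE B (Python) =====
-- def build_option_map(parsed_rows):
--     """Map compatibility family number to aggregated option token string."""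
--     pairs = [(row["reference_family"], row.get("options", ""))
--              for row in parsed_rows if row.get("reference_family")]
--     families = list(dict.fromkeys(f for f, _ in pairs))
--     return {f: ";".join(list(dict.fromkeys(t for g, t in pairs if g == f and t))[:12])
--             for f in families}
-- ===== Notes on version B (the rewrite author's own statement) =====
-- stated objective: simpler
-- what changed: B replaces A's single-pass dict-of-lists accumulator (setdefault plus inline membership test) by staged comprehensions: first flatten the rows into (family, token) pairs, then take the families in first-occurrence order, then per family dedup-and-truncate its truthy tokens.
import Mathlib
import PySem

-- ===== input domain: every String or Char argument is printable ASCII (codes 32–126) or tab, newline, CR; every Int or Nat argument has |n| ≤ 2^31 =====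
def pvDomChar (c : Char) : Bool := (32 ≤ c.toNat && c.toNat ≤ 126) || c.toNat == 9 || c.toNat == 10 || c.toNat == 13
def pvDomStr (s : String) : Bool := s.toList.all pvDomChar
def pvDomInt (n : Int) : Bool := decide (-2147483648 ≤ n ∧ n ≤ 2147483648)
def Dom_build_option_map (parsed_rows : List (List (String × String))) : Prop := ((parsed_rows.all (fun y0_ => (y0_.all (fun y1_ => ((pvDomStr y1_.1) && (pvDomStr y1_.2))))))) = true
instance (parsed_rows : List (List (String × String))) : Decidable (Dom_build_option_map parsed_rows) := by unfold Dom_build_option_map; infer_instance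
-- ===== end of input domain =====

-- B replaces A's single-pass dict accumulator by staged comprehensions over flattened (family, token) pairs (simpler decomposition).

-- ===== PORT A =====
-- stepA: one iteration of A's loop body (rows are Python dicts, first-match lookup via Dict.mk)
def stepA (d : PySem.Dict String (List String)) (row : List (String × String)) :
    PySem.Dict String (List String) :=
  let rd := PySem.Dict.mk row
  match rd.get? "reference_family" with
  | none => d                                    -- row.get returns None → falsy → continue
  | some family =>
    if family = "" then d                        -- empty string falsy → continue
    else
      let d1 := d.setdefault family []
      let token := rd.getD "options" ""
      if token ≠ "" ∧ token ∉ d1.getD family [] then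
        d1.modify family [] (· ++ [token])       -- by_family[family].append(token)
      else d1

-- tokens[:12] is List.take 12 (nonnegative stop slice, exact)
def build_option_map (parsed_rows : List (List (String × String))) : List (String × String) :=
  (parsed_rows.foldl stepA PySem.Dict.empty).items.map
    (fun p => (p.1, PySem.Str.join ";" (p.2.take 12)))

-- ===== PORT B =====
-- (row["reference_family"], row.get("options","")) for rows with truthy family → filterMap
def pairOf (row : List (String × String)) : Option (String × String) :=
  let rd := PySem.Dict.mk row
  match rd.get? "reference_family" with
  | none => none
  | some f => if f = "" then none else some (f, rd.getD "options" "")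

-- list(dict.fromkeys(…)) is PySem.List.dedup; [:12] is take 12
def build_option_map_alt (parsed_rows : List (List (String × String))) : List (String × String) :=
  let pairs := parsed_rows.filterMap pairOf
  let families := PySem.List.dedup (pairs.map Prod.fst)
  families.map (fun f =>
    (f, PySem.Str.join ";"
      ((PySem.List.dedup (pairs.filterMap
          (fun p => if p.1 = f ∧ p.2 ≠ "" then some p.2 else none))).take 12)))

-- ===== PRECONDITION & SPEC =====
def Spec_build_option_map (parsed_rows : List (List (String × String))) (out : List (String × String)) : Prop := out = build_option_map_alt parsed_rows
instance (parsed_rows : List (List (String × String))) (out : List (String × String)) : Decidable (Spec_build_option_map parsed_rows out) := by unfold Spec_build_option_map; infer_instance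

-- ===== CLAIM =====
def Claim_equal_build_option_map : Prop := ∀ (parsed_rows : List (List (String × String))), Dom_build_option_map parsed_rows → Spec_build_option_map parsed_rows (build_option_map parsed_rows)

-- ===== LEMMAS AND PROOFS =====

-- tokens contributed to family f by a list of (family, token) pairs
def toksFor (P : List (String × String)) (f : String) : List String :=
  P.filterMap (fun p => if p.1 = f ∧ p.2 ≠ "" then some p.2 else none)

-- Invariant: A's accumulator after processing rows whose pairs are P
def AInv (P : List (String × String)) (d : PySem.Dict String (List String)) : Prop :=
  d.keys = PySem.List.dedup (P.map Prod.fst) ∧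
  ∀ f, d.getD f [] = PySem.List.dedup (toksFor P f)

theorem dedup_snoc {α : Type} [DecidableEq α] (t : α) (xs : List α) :
    PySem.List.dedup (xs ++ [t]) =
      if t ∈ xs then PySem.List.dedup xs else PySem.List.dedup xs ++ [t] := by
  simp only [PySem.List.dedup_eq_ofList, PySem.Set.ofList_append,
    PySem.Set.update_cons, PySem.Set.update_nil, PySem.Set.add]
  by_cases h : t ∈ xs <;> simp [h, PySem.Set.contains, PySem.Set.mem_ofList]

theorem toksFor_snoc (P : List (String × String)) (p : (String × String)) (f : String) :
    toksFor (P ++ [p]) f =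
      toksFor P f ++ (if p.1 = f ∧ p.2 ≠ "" then [p.2] else []) := by
  simp only [toksFor, List.filterMap_append, List.filterMap_cons, List.filterMap_nil]
  split_ifs <;> simp

theorem AInv_step (P : List (String × String)) (d : PySem.Dict String (List String))
    (row : List (String × String)) (h : AInv P d) :
    AInv (P ++ (pairOf row).toList) (stepA d row) := by
  obtain ⟨hk, hv⟩ := h
  simp only [stepA, pairOf]
  cases hget : (PySem.Dict.mk row).get? "reference_family" with
  | none => simpa using ⟨hk, hv⟩
  | some family =>
    simp only
    by_cases hfam : family = ""
    · simp only [if_pos hfam, Option.toList_none, List.append_nil]; exact ⟨hk, hv⟩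
    · simp only [if_neg hfam, Option.toList_some]
      set t := (PySem.Dict.mk row).getD "options" "" with ht
      -- facts about the setdefault'd dict d1
      have hmemk : family ∈ d.keys ↔ family ∈ P.map Prod.fst := by
        rw [hk, PySem.List.mem_dedup]
      have hc : d.contains family = true ↔ family ∈ P.map Prod.fst := by
        rw [PySem.Dict.contains_iff_mem_keys]; exact hmemk
      have hkeys1 : (d.setdefault family []).keys
          = PySem.List.dedup ((P ++ [(family, t)]).map Prod.fst) := by
        simp only [List.map_append, List.map_cons, List.map_nil]
        rw [PySem.Dict.keys_setdefault, dedup_snoc]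
        by_cases hm : family ∈ P.map Prod.fst
        · simp [hc.mpr hm, hk, hm]
        · rw [if_neg (by simpa using (fun hh => hm (hc.mp hh)) : ¬ d.contains family = true), hk]
          simp [hm]
      have hgd1 : ∀ g, (d.setdefault family []).getD g [] = d.getD g [] := by
        intro g
        by_cases hgf : g = family
        · subst hgf; exact PySem.Dict.getD_setdefault_self ..
        · rw [PySem.Dict.getD_eq_get?_getD, PySem.Dict.get?_setdefault_of_ne _ _ hgf,
            ← PySem.Dict.getD_eq_get?_getD]
      have hc1 : (d.setdefault family []).contains family = true := by
        simp [PySem.Dict.contains_setdefault]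
      by_cases htok : t = ""
      · -- token falsy: no append
        rw [if_neg (by simp [htok])]
        refine ⟨hkeys1, fun g => ?_⟩
        rw [hgd1 g, hv g, toksFor_snoc]
        simp [htok]
      · -- token truthy
        by_cases hmem : t ∈ (d.setdefault family []).getD family []
        · -- already present: no append
          rw [if_neg (by simp [hmem])]
          have hmemT : t ∈ toksFor P family := by
            rw [hgd1, hv, PySem.List.mem_dedup] at hmem; exact hmem
          refine ⟨hkeys1, fun g => ?_⟩
          rw [hgd1 g, hv g, toksFor_snoc]
          by_cases hgf : g = family
          · subst hgf
            rw [if_pos ⟨rfl, htok⟩, dedup_snoc, if_pos hmemT]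
          · rw [if_neg (fun h => hgf h.1.symm), List.append_nil]
        · -- append t
          rw [if_pos ⟨htok, hmem⟩]
          have hmemT : t ∉ toksFor P family := by
            rw [hgd1, hv, PySem.List.mem_dedup] at hmem; exact hmem
          have hkeys2 : (PySem.Dict.modify (d.setdefault family []) family [] (· ++ [t])).keys
              = (d.setdefault family []).keys := by
            rw [PySem.Dict.keys_modify, PySem.Dict.keys_insert_of_contains _ _ hc1]
          refine ⟨hkeys2.trans hkeys1, fun g => ?_⟩
          rw [PySem.Dict.getD_modify, toksFor_snoc]
          by_cases hgf : g = family
          · subst hgf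
            rw [if_pos rfl, if_pos ⟨rfl, htok⟩, hgd1, hv, dedup_snoc, if_neg hmemT]
          · rw [if_neg hgf, if_neg (fun h => hgf h.1.symm), List.append_nil, hgd1 g, hv g]

theorem filterMap_pairOf_cons (r : List (String × String)) (rs : List (List (String × String))) :
    List.filterMap pairOf (r :: rs) = (pairOf r).toList ++ List.filterMap pairOf rs := by
  rw [List.filterMap_cons]
  cases pairOf r <;> simp

theorem AInv_fold (rows : List (List (String × String)))
    (P : List (String × String)) (d : PySem.Dict String (List String)) (h : AInv P d) :
    AInv (P ++ rows.filterMap pairOf) (rows.foldl stepA d) := by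
  induction rows generalizing P d with
  | nil => simpa using h
  | cons r rs ih =>
    have := ih (P ++ (pairOf r).toList) (stepA d r) (AInv_step P d r h)
    rw [filterMap_pairOf_cons, ← List.append_assoc]
    exact this

-- ===== VERDICT =====
theorem build_option_map_spec : Claim_equal_build_option_map := by
  intro rows _
  unfold Spec_build_option_map build_option_map build_option_map_alt
  obtain ⟨hk, hv⟩ := AInv_fold rows [] PySem.Dict.empty
    ⟨by simp [PySem.Dict.keys_empty, PySem.List.dedup], fun f => by
      simp [PySem.Dict.getD_empty, toksFor, PySem.List.dedup]⟩
  simp only [List.nil_append] at hk hv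
  have hnd : (rows.foldl stepA PySem.Dict.empty).keys.Nodup := by
    rw [hk]; simp [PySem.List.dedup_eq_ofList, PySem.Set.nodup_ofList]
  rw [PySem.Dict.items_eq_map_keys _ hnd ([] : List String), hk]
  simp only [List.map_map]
  refine List.map_congr_left (fun f _ => ?_)
  simp [Function.comp, hv f, toksFor]
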